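-- pv_equiv track=rewrite | github.com/Oddlybird/Dancestry | trolldeets.py | bloodsort_orig
-- ===== SOURCE A (Python) =====
-- def bloodsort_orig(blood):  # trolldeets.  Put in a group of letters.
--     a = 0  # count the number of letters stripped out
--     sortedblood = ""  # sorted blood code
--     for arb in blood:  # for each letter...
--         if arb == "R":
--             sortedblood = sortedblood + "R"
--             a = a + 1
--         if a == len(blood):
--             break
--     for arb in blood:  # for each letter...
--         if arb == "G":
--             sortedblood = sortedblood + "G"
--             a = a + 1
--         if a == len(blood):
--             break
--     for arb in blood:  # for each letter...
--         if arb == "B":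
--             sortedblood = sortedblood + "B"
--             a = a + 1
--         if a == len(blood):
--             break
--     for arb in blood:  # for each letter...
--         if arb == "r":
--             sortedblood = sortedblood + "r"
--             a = a + 1
--         if a == len(blood):
--             break
--     for arb in blood:  # for each letter...
--         if arb == "g":
--             sortedblood = sortedblood + "g"
--             a = a + 1
--         if a == len(blood):
--             break
--     for arb in blood:  # for each letter...
--         if arb == "b":
--             sortedblood = sortedblood + "b"
--             a = a + 1
--         if a == len(blood):
--             break
--     return sortedblood
-- ===== SOURCE B (Python) =====
-- ORDER = {'R': 0, 'G': 1, 'B': 2, 'r': 3, 'g': 4, 'b': 5}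
--
-- def bloodsort_orig(blood):
--     return "".join(sorted((c for c in blood if c in ORDER), key=lambda c: ORDER[c]))
-- ===== Notes on version B (the rewrite author's own statement) =====
-- stated objective: simpler
-- what changed: Replaced A's six sequential per-letter scans with their count-and-break bookkeeping by a single filter over a priority map followed by one stable sort keyed on that map, joined into a string.
import Mathlib
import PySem

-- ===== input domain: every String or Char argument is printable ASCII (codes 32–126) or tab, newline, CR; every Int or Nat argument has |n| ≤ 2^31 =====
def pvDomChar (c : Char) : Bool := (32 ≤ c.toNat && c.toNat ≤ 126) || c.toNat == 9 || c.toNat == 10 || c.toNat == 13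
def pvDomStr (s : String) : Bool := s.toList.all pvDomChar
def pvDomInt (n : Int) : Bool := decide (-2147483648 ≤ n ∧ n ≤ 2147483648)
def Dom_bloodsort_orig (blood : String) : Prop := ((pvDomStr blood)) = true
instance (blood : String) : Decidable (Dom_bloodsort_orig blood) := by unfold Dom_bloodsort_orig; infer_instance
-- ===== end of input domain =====

-- B replaces A's six priority-ordered scans (with their count-and-break bookkeeping) by one
-- filter + stable sort under a priority map; objective: simpler (same exact output).

-- ===== PORT A =====
-- one 'for arb in blood' pass of A: append ch on match, count in a, break when a == len(blood)
def pvLoopA (ch : Char) (cs : List Char) (n : Nat) (sb : List Char) (a : Nat) : List Char × Nat :=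
  match cs with
  | [] => (sb, a)
  | c :: rest =>
    let sb' := if c = ch then sb ++ [ch] else sb
    let a'  := if c = ch then a + 1 else a
    if a' = n then (sb', a') else pvLoopA ch rest n sb' a'

def bloodsort_orig (blood : String) : String :=
  let cs := blood.toList
  let n := cs.length
  let s1 := pvLoopA 'R' cs n [] 0
  let s2 := pvLoopA 'G' cs n s1.1 s1.2
  let s3 := pvLoopA 'B' cs n s2.1 s2.2
  let s4 := pvLoopA 'r' cs n s3.1 s3.2
  let s5 := pvLoopA 'g' cs n s4.1 s4.2
  let s6 := pvLoopA 'b' cs n s5.1 s5.2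
  String.ofList s6.1

-- ===== PORT B =====
-- ORDER = {'R': 0, 'G': 1, 'B': 2, 'r': 3, 'g': 4, 'b': 5}
def pvORDER : PySem.Dict Char Int :=
  PySem.Dict.mk [('R', 0), ('G', 1), ('B', 2), ('r', 3), ('g', 4), ('b', 5)]

-- key=lambda c: ORDER[c]; the filter guarantees the key is present, so getD's default is never used
def pvKeyB (c : Char) : Int := PySem.Dict.getD pvORDER c 0

def bloodsort_orig_alt (blood : String) : String :=
  String.ofList (PySem.List.sorted
    (blood.toList.filter (fun c => (PySem.Dict.get? pvORDER c).isSome)) pvKeyB false)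

-- ===== PRECONDITION & SPEC =====
def Spec_bloodsort_orig (blood : String) (out : String) : Prop := out = bloodsort_orig_alt blood
instance (blood : String) (out : String) : Decidable (Spec_bloodsort_orig blood out) := by unfold Spec_bloodsort_orig; infer_instance

-- ===== CLAIM (what is proved, stated in full; the proofs are below) =====
def Claim_equal_bloodsort_orig : Prop := ∀ (blood : String), Dom_bloodsort_orig blood → Spec_bloodsort_orig blood (bloodsort_orig blood)

-- ===== LEMMAS AND PROOFS =====

-- A's loop never really breaks early in a way that matters: as long as the running count a
-- plus the remaining matches fits in n, the pass appends exactly the matches of ch.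
theorem pvLoopA_eq (ch : Char) (cs : List Char) (n : Nat) (sb : List Char) (a : Nat)
    (h : a + cs.count ch ≤ n) :
    pvLoopA ch cs n sb a = (sb ++ cs.filter (· == ch), a + cs.count ch) := by
  induction cs generalizing sb a with
  | nil => simp [pvLoopA]
  | cons c rest ih =>
    by_cases hc : c = ch
    · subst hc
      simp only [List.count_cons_self] at h
      by_cases hb : a + 1 = n
      · have hz : rest.count c = 0 := by omega
        have hnm : c ∉ rest := by rw [← List.count_eq_zero]; exact hz
        have hfil : rest.filter (· == c) = [] :=
          List.filter_eq_nil_iff.mpr (fun x hx => by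
            simp only [beq_iff_eq]; intro he; exact hnm (he ▸ hx))
        simp [pvLoopA, hb, hz, hfil]
      · rw [show pvLoopA c (c :: rest) n sb a
              = pvLoopA c rest n (sb ++ [c]) (a + 1) by simp [pvLoopA, hb]]
        rw [ih (sb ++ [c]) (a + 1) (by omega)]
        simp
        omega
    · have hcount : (c :: rest).count ch = rest.count ch := by
        simp [hc]
      rw [hcount] at h
      by_cases hb : a = n
      · have hz : rest.count ch = 0 := by omega
        have hnm : ch ∉ rest := by rw [← List.count_eq_zero]; exact hz
        have hfil : rest.filter (· == ch) = [] :=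
          List.filter_eq_nil_iff.mpr (fun x hx => by
            simp only [beq_iff_eq]; intro he; exact hnm (he ▸ hx))
        simp [pvLoopA, hc, hb, hz, hfil, hcount]
      · rw [show pvLoopA ch (c :: rest) n sb a = pvLoopA ch rest n sb a by
              simp [pvLoopA, hc, hb]]
        rw [ih sb a h]
        simp [hcount, hc]

-- the six letters are distinct, so their counts sum to at most the length
theorem pvCounts_le (cs : List Char) :
    cs.count 'R' + cs.count 'G' + cs.count 'B' + cs.count 'r' + cs.count 'g' + cs.count 'b'
      ≤ cs.length := by
  induction cs with
  | nil => simp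
  | cons c rest ih =>
    simp only [List.count_cons, List.length_cons]
    split_ifs <;> simp_all <;> omega

def pvGroups (cs : List Char) : List Char :=
  cs.filter (· == 'R') ++ cs.filter (· == 'G') ++ cs.filter (· == 'B') ++
  cs.filter (· == 'r') ++ cs.filter (· == 'g') ++ cs.filter (· == 'b')

theorem pvA_eq_groups (cs : List Char) : bloodsort_orig (String.ofList cs) = String.ofList (pvGroups cs) := by
  have h := pvCounts_le cs
  unfold bloodsort_orig
  simp only [String.toList_ofList]
  rw [pvLoopA_eq 'R' cs cs.length [] 0 (by omega)]
  rw [pvLoopA_eq 'G' cs cs.length _ _ (by omega)]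
  rw [pvLoopA_eq 'B' cs cs.length _ _ (by omega)]
  rw [pvLoopA_eq 'r' cs cs.length _ _ (by omega)]
  rw [pvLoopA_eq 'g' cs cs.length _ _ (by omega)]
  rw [pvLoopA_eq 'b' cs cs.length _ _ (by omega)]
  simp [pvGroups, List.append_assoc]

def pvBefore (a b : Char) : Bool := decide (pvKeyB a < pvKeyB b)

theorem pvInsertBy_append_not (x : Char) (u v : List Char)
    (hu : ∀ y ∈ u, pvBefore x y = false) :
    PySem.List.insertBy pvBefore x (u ++ v) = u ++ PySem.List.insertBy pvBefore x v := by
  induction u with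
  | nil => simp
  | cons y ys ih =>
    have hy : pvBefore x y = false := hu y (by simp)
    simp only [List.cons_append, PySem.List.insertBy, hy]
    simp [ih (fun z hz => hu z (by simp [hz]))]

theorem pvInsertBy_all_before (x : Char) (v : List Char)
    (hv : ∀ y ∈ v, pvBefore x y = true) :
    PySem.List.insertBy pvBefore x v = x :: v := by
  cases v with
  | nil => simp [PySem.List.insertBy]
  | cons y ys => simp [PySem.List.insertBy, hv y (by simp)]

def pvSix : List Char := ['R', 'G', 'B', 'r', 'g', 'b']

theorem pvMem_filter_eq (ch : Char) (cs : List Char) (y : Char) (hy : y ∈ cs.filter (· == ch)) :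
    y = ch := by
  have := List.of_mem_filter hy
  simpa using this

theorem pvInsert_groups (c : Char) (hc : c ∈ pvSix) (l : List Char) :
    PySem.List.insertBy pvBefore c (pvGroups l) = pvGroups (l ++ [c]) := by
  have fR := pvMem_filter_eq 'R' l
  have fG := pvMem_filter_eq 'G' l
  have fB := pvMem_filter_eq 'B' l
  have fr := pvMem_filter_eq 'r' l
  have fg := pvMem_filter_eq 'g' l
  have fb := pvMem_filter_eq 'b' l
  simp only [pvSix, List.mem_cons, List.not_mem_nil, or_false] at hc
  simp only [pvGroups, List.filter_append, List.append_assoc]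
  rcases hc with h | h | h | h | h | h <;> subst h
  · -- c = 'R'
    rw [pvInsertBy_append_not _ _ _ (by intro y hy; rw [fR y hy]; decide)]
    rw [pvInsertBy_all_before _ _ (by
      intro y hy
      simp only [List.mem_append] at hy
      rcases hy with hy | hy | hy | hy | hy
      · rw [fG y hy]; decide
      · rw [fB y hy]; decide
      · rw [fr y hy]; decide
      · rw [fg y hy]; decide
      · rw [fb y hy]; decide)]
    simp
  · -- c = 'G'
    rw [pvInsertBy_append_not _ _ _ (by intro y hy; rw [fR y hy]; decide)]
    rw [pvInsertBy_append_not _ _ _ (by intro y hy; rw [fG y hy]; decide)]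
    rw [pvInsertBy_all_before _ _ (by
      intro y hy
      simp only [List.mem_append] at hy
      rcases hy with hy | hy | hy | hy
      · rw [fB y hy]; decide
      · rw [fr y hy]; decide
      · rw [fg y hy]; decide
      · rw [fb y hy]; decide)]
    simp
  · -- c = 'B'
    rw [pvInsertBy_append_not _ _ _ (by intro y hy; rw [fR y hy]; decide)]
    rw [pvInsertBy_append_not _ _ _ (by intro y hy; rw [fG y hy]; decide)]
    rw [pvInsertBy_append_not _ _ _ (by intro y hy; rw [fB y hy]; decide)]
    rw [pvInsertBy_all_before _ _ (by
      intro y hy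
      simp only [List.mem_append] at hy
      rcases hy with hy | hy | hy
      · rw [fr y hy]; decide
      · rw [fg y hy]; decide
      · rw [fb y hy]; decide)]
    simp
  · -- c = 'r'
    rw [pvInsertBy_append_not _ _ _ (by intro y hy; rw [fR y hy]; decide)]
    rw [pvInsertBy_append_not _ _ _ (by intro y hy; rw [fG y hy]; decide)]
    rw [pvInsertBy_append_not _ _ _ (by intro y hy; rw [fB y hy]; decide)]
    rw [pvInsertBy_append_not _ _ _ (by intro y hy; rw [fr y hy]; decide)]
    rw [pvInsertBy_all_before _ _ (by
      intro y hy
      simp only [List.mem_append] at hy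
      rcases hy with hy | hy
      · rw [fg y hy]; decide
      · rw [fb y hy]; decide)]
    simp
  · -- c = 'g'
    rw [pvInsertBy_append_not _ _ _ (by intro y hy; rw [fR y hy]; decide)]
    rw [pvInsertBy_append_not _ _ _ (by intro y hy; rw [fG y hy]; decide)]
    rw [pvInsertBy_append_not _ _ _ (by intro y hy; rw [fB y hy]; decide)]
    rw [pvInsertBy_append_not _ _ _ (by intro y hy; rw [fr y hy]; decide)]
    rw [pvInsertBy_append_not _ _ _ (by intro y hy; rw [fg y hy]; decide)]
    rw [pvInsertBy_all_before _ _ (by intro y hy; rw [fb y hy]; decide)]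
    simp
  · -- c = 'b'
    rw [pvInsertBy_append_not _ _ _ (by intro y hy; rw [fR y hy]; decide)]
    rw [pvInsertBy_append_not _ _ _ (by intro y hy; rw [fG y hy]; decide)]
    rw [pvInsertBy_append_not _ _ _ (by intro y hy; rw [fB y hy]; decide)]
    rw [pvInsertBy_append_not _ _ _ (by intro y hy; rw [fr y hy]; decide)]
    rw [pvInsertBy_append_not _ _ _ (by intro y hy; rw [fg y hy]; decide)]
    rw [PySem.List.insertBy_of_forall_not_before _ _ _ (by intro y hy; rw [fb y hy]; decide)]
    simp

theorem pvPred_mem (x : Char) (h : (PySem.Dict.get? pvORDER x).isSome = true) : x ∈ pvSix := by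
  simp only [PySem.Dict.get?, pvORDER] at h
  rw [Option.isSome_map] at h
  rw [List.find?_isSome] at h
  obtain ⟨p, hp, he⟩ := h
  simp only [pvSix]
  fin_cases hp <;> simp_all <;> (subst he; tauto)

theorem pvGroups_filter (cs : List Char) :
    pvGroups (cs.filter (fun c => (PySem.Dict.get? pvORDER c).isSome)) = pvGroups cs := by
  unfold pvGroups
  have step : ∀ ch : Char, (PySem.Dict.get? pvORDER ch).isSome = true →
      (cs.filter (fun c => (PySem.Dict.get? pvORDER c).isSome)).filter (· == ch)
        = cs.filter (· == ch) := by
    intro ch hch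
    rw [List.filter_filter]
    apply List.filter_congr
    intro a _
    by_cases ha : a = ch
    · subst ha
      simp [hch]
    · simp [ha]
  rw [step 'R' (by decide), step 'G' (by decide), step 'B' (by decide),
      step 'r' (by decide), step 'g' (by decide), step 'b' (by decide)]

theorem pvFoldl_groups (l : List Char) (hl : ∀ x ∈ l, x ∈ pvSix) :
    List.foldl (fun acc x => PySem.List.insertBy pvBefore x acc) [] l = pvGroups l := by
  induction l using List.reverseRecOn with
  | nil => simp [pvGroups]
  | append_singleton l c ih =>
    rw [List.foldl_append]
    simp only [List.foldl_cons, List.foldl_nil]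
    rw [ih (fun x hx => hl x (by simp [hx]))]
    exact pvInsert_groups c (hl c (by simp)) l

theorem pvB_eq_groups (cs : List Char) :
    PySem.List.sorted (cs.filter (fun c => (PySem.Dict.get? pvORDER c).isSome)) pvKeyB false
      = pvGroups cs := by
  rw [PySem.List.sorted_eq_foldl_insertBy]
  rw [show (fun a b => decide (pvKeyB a < pvKeyB b)) = pvBefore from rfl]
  rw [pvFoldl_groups _ (fun x hx => by
    have := List.of_mem_filter hx
    exact pvPred_mem x this)]
  exact pvGroups_filter cs

-- ===== VERDICT (by name: the statement is the Claim_ definition above) =====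
theorem bloodsort_orig_spec : Claim_equal_bloodsort_orig := by
  intro blood _
  unfold Spec_bloodsort_orig bloodsort_orig_alt
  have h1 : blood = String.ofList blood.toList := by simp
  rw [pvB_eq_groups]
  conv_lhs => rw [h1]
  exact pvA_eq_groups blood.toList
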